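-- pv_equiv track=rewrite | github.com/wighs33/scripts_project_bestSeller | func.py | changeTitle
-- ===== SOURCE A (Python) =====
-- def changeTitle(title):     # 책 제목 라벨 크기에 맞게 변경
--     c_title = ''
--     line = 1
--     over = False
--     while len(title) > 7:
--         if line == 3:
--             over = True
--             c_title += title[:5]
--             c_title += '...'
--             break
--         else:
--             c_title += title[:7]
--             c_title += '\n'
--             title = title[7:]
--             line += 1
--     if over is False:
--         c_title += title
--     return c_title
-- ===== SOURCE B (Python) =====
-- def chunk7(s):
--     # split into 7-char lines, recursively
--     if len(s) <= 7:
--         return s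
--     return s[:7] + '\n' + chunk7(s[7:])
--
--
-- def changeTitle(title):
--     if len(title) > 21:
--         return title[:7] + '\n' + title[7:14] + '\n' + title[14:19] + '...'
--     return chunk7(title)
-- ===== Notes on version B (the rewrite author's own statement) =====
-- stated objective: simpler
-- what changed: Replaces the stateful while-loop with its line counter, over flag, break and in-place title reassignment by a single length test: a closed-form three-slice truncation for long titles, else a small recursive 7-char chunker.
import Mathlib
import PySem

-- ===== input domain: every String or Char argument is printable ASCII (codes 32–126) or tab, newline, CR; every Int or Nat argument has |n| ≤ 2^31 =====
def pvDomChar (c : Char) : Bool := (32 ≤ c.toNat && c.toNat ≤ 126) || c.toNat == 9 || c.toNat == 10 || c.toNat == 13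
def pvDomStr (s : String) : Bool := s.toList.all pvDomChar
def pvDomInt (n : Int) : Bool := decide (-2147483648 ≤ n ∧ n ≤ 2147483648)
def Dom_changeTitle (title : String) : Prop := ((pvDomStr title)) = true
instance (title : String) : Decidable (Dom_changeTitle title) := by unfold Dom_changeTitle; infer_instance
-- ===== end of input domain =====

-- B replaces A's stateful while-loop (line counter, over flag, break, title reassignment)
-- by one length test: a closed-form three-slice truncation for long titles, else a
-- recursive 7-char chunker; return values agree on all inputs (no side effects involved).

-- ===== PORT A =====
-- the while-loop of A: state (c_title, title, line); returns (c_title, title, over)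
def changeTitleLoop (c_title : List Char) (title : List Char) (line : Int) :
    List Char × List Char × Bool :=
  if 7 < title.length then
    if line = 3 then
      (c_title ++ PySem.List.slice title none (some 5) ++ "...".toList, title, true)
    else
      changeTitleLoop (c_title ++ PySem.List.slice title none (some 7) ++ ['\n'])
        (PySem.List.slice title (some 7) none) (line + 1)
  else (c_title, title, false)
termination_by title.length
decreasing_by
  simp [PySem.List.slice_from (a := (7:Int)) (by omega)]
  omega

def changeTitle (title : String) : String :=
  let r := changeTitleLoop [] title.toList 1
  if r.2.2 = false then String.ofList (r.1 ++ r.2.1) else String.ofList r.1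

-- ===== PORT B =====
def chunk7 (s : List Char) : List Char :=
  if s.length ≤ 7 then s
  else PySem.List.slice s none (some 7) ++ ['\n'] ++
       chunk7 (PySem.List.slice s (some 7) none)
termination_by s.length
decreasing_by
  simp [PySem.List.slice_from (a := (7:Int)) (by omega)]
  omega

def changeTitle_alt (title : String) : String :=
  if 21 < title.toList.length then
    String.ofList (PySem.List.slice title.toList none (some 7) ++ ['\n'] ++
               PySem.List.slice title.toList (some 7) (some 14) ++ ['\n'] ++
               PySem.List.slice title.toList (some 14) (some 19) ++ "...".toList)
  else String.ofList (chunk7 title.toList)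

-- ===== PRECONDITION & SPEC =====
def Spec_changeTitle (title : String) (out : String) : Prop := out = changeTitle_alt title
instance (title : String) (out : String) : Decidable (Spec_changeTitle title out) := by unfold Spec_changeTitle; infer_instance

-- ===== CLAIM (what is proved, stated in full; the proofs are below) =====
def Claim_equal_changeTitle : Prop := ∀ (title : String), Dom_changeTitle title → Spec_changeTitle title (changeTitle title)

-- ===== LEMMAS AND PROOFS =====

theorem changeTitle_spec : Claim_equal_changeTitle := by
  intro title _
  unfold Spec_changeTitle changeTitle changeTitle_alt
  set cs := title.toList with hcs
  clear_value cs
  have t7 : ∀ xs : List Char, PySem.List.slice xs none (some 7) = xs.take 7 :=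
    fun xs => by simp [pysem]
  have t5 : ∀ xs : List Char, PySem.List.slice xs none (some 5) = xs.take 5 :=
    fun xs => by simp [pysem]
  have d7 : ∀ xs : List Char, PySem.List.slice xs (some 7) none = xs.drop 7 :=
    fun xs => by simp [pysem]
  have s714 : ∀ xs : List Char, PySem.List.slice xs (some 7) (some 14) = (xs.drop 7).take 7 :=
    fun xs => by simp [pysem]
  have s1419 : ∀ xs : List Char, PySem.List.slice xs (some 14) (some 19) = (xs.drop 14).take 5 :=
    fun xs => by simp [pysem]
  by_cases h21 : 21 < cs.length
  · -- long titles: A's loop runs twice then breaks at line 3; B takes the slice branch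
    rw [changeTitleLoop]
    simp only [t7, t5, d7, if_pos (by omega : 7 < cs.length),
      if_neg (by norm_num : ¬ (1:Int) = 3)]
    rw [changeTitleLoop]
    simp only [t7, t5, d7, List.length_drop, List.drop_drop,
      if_pos (by omega : 7 < cs.length - 7), if_neg (by norm_num : ¬ (1:Int) + 1 = 3)]
    rw [changeTitleLoop]
    simp only [t7, t5, d7, List.length_drop, List.drop_drop,
      if_pos (by omega : 7 < cs.length - 14), if_pos (by norm_num : (1:Int) + 1 + 1 = 3)]
    simp only [if_pos h21, s714, s1419]
    simp
  · -- short titles: over stays false; the loop and chunk7 peel the same 7-char chunks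
    simp only [if_neg h21]
    rw [changeTitleLoop, chunk7]
    by_cases h7 : 7 < cs.length
    · simp only [t7, d7, if_pos h7, if_neg (by norm_num : ¬ (1:Int) = 3),
        if_neg (by omega : ¬ cs.length ≤ 7)]
      rw [changeTitleLoop, chunk7]
      simp only [t7, d7, List.length_drop, List.drop_drop]
      by_cases h14 : 7 < cs.length - 7
      · simp only [if_pos h14, if_neg (by norm_num : ¬ (1:Int) + 1 = 3),
          if_neg (by omega : ¬ cs.length - 7 ≤ 7)]
        rw [changeTitleLoop, chunk7]
        simp only [t7, d7, List.length_drop, List.drop_drop,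
          if_neg (by omega : ¬ 7 < cs.length - 14), if_pos (by omega : cs.length - (7 + 7) ≤ 7)]
        simp
      · simp only [if_neg h14, if_pos (by omega : cs.length - 7 ≤ 7)]
        simp
    · simp only [if_neg h7, if_pos (by omega : cs.length ≤ 7)]
      simp

-- ===== VERDICT (by name: the statement is the Claim_ definition above) =====
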